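-- pv_equiv track=rewrite | github.com/kevinmoralesc/analizadorLexico | AutomataOperadorLogico.py | automata_logico
-- ===== SOURCE A (Python) =====
-- def automata_logico(input_string):
--     AutomataPattern = {
--         'q0': {'Y': 'q1', 'O': 'q2', 'N': 'q3'},
--         'q1': {'Y': 'q4'},
--         'q2': {'O': 'q5'},
--         'q3': {'N': 'q6'},
--         'q4': {},  # Estado de aceptación para 'YY'
--         'q5': {},  # Estado de aceptación para 'OO'
--         'q6': {},  # Estado de aceptación para 'NN'
--     }
--
--     current_state = 'q0'
--     for char in input_string:
--         if char in AutomataPattern[current_state]: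
--             current_state = AutomataPattern[current_state][char]
--         else:
--             return False  # Si el carácter no es válido para el estado actual, la cadena no es válida
--     # Verificar si el último estado es un estado de aceptación
--     if current_state in {'q4', 'q5', 'q6'}:
--         return True
--     else:
--         return False
-- ===== SOURCE B (Python) =====
-- def automata_logico(input_string):
--     chars = list(input_string)
--     return len(chars) == 2 and chars[0] == chars[1] and chars[0] in ('Y', 'O', 'N')
-- ===== Notes on version B (the rewrite author's own statement) =====
-- stated objective: simpler
-- what changed: Replaces the DFA transition table and state-stepping loop with a direct closed-form check: the input has exactly two equal characters and that character belongs to the three-letter accept alphabet.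
import Mathlib
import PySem

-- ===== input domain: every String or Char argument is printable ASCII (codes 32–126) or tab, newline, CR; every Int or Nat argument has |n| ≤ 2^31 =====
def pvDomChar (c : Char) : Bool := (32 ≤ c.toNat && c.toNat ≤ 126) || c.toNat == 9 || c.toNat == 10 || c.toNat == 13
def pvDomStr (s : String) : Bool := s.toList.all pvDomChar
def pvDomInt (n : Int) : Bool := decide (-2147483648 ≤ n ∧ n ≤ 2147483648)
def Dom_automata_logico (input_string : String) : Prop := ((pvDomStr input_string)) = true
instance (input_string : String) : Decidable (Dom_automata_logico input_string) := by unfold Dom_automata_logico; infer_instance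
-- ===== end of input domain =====

-- B replaces A's DFA transition table and stepping loop with a direct closed-form
-- check (exactly two equal characters, that character in {'Y','O','N'}); objective: simpler.


-- ===== PORT A =====
-- the dict-of-dicts AutomataPattern, read as: lookup of char c in AutomataPattern[st]
def pvTrans (st : String) (c : Char) : Option String :=
  if st == "q0" then (if c == 'Y' then some "q1" else if c == 'O' then some "q2" else if c == 'N' then some "q3" else none)
  else if st == "q1" then (if c == 'Y' then some "q4" else none)
  else if st == "q2" then (if c == 'O' then some "q5" else none)
  else if st == "q3" then (if c == 'N' then some "q6" else none)
  else none

-- the for-loop with early 'return False', then the acceptance test at the end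
def pvLoopA : List Char → String → Bool
  | [], st => st == "q4" || st == "q5" || st == "q6"
  | c :: cs, st =>
    match pvTrans st c with
    | some st' => pvLoopA cs st'
    | none => false

def automata_logico (input_string : String) : Bool :=
  pvLoopA input_string.toList "q0"

-- ===== PORT B =====
def automata_logico_alt (input_string : String) : Bool :=
  let chars := input_string.toList
  chars.length == 2 &&
    (PySem.List.pyGet? chars 0 == PySem.List.pyGet? chars 1) &&
    (match PySem.List.pyGet? chars 0 with
     | some c => c == 'Y' || c == 'O' || c == 'N'
     | none => false)

-- ===== PRECONDITION & SPEC =====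
def Spec_automata_logico (input_string : String) (out : Bool) : Prop := out = automata_logico_alt input_string
instance (input_string : String) (out : Bool) : Decidable (Spec_automata_logico input_string out) := by unfold Spec_automata_logico; infer_instance

-- ===== CLAIM (what is proved, stated in full; the proofs are below) =====
def Claim_equal_automata_logico : Prop := ∀ (input_string : String), Dom_automata_logico input_string → Spec_automata_logico input_string (automata_logico input_string)

-- ===== LEMMAS AND PROOFS =====

lemma pvLoopA_eq_alt (l : List Char) :
    pvLoopA l "q0" =
      (l.length == 2 &&
        (PySem.List.pyGet? l 0 == PySem.List.pyGet? l 1) &&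
        (match PySem.List.pyGet? l 0 with
         | some c => c == 'Y' || c == 'O' || c == 'N'
         | none => false)) := by
  match l with
  | [] => rfl
  | [a] =>
    by_cases hY : a = 'Y' <;> by_cases hO : a = 'O' <;> by_cases hN : a = 'N' <;>
      simp_all [pvLoopA, pvTrans, PySem.List.pyGet?, PySem.List.pyIdx?]
  | [a, b] =>
    by_cases hY : a = 'Y' <;> by_cases hO : a = 'O' <;> by_cases hN : a = 'N' <;>
      by_cases hb : b = a <;>
        simp_all [pvLoopA, pvTrans, PySem.List.pyGet?, PySem.List.pyIdx?] <;>
        (intro h; subst h; simp_all)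
  | a :: b :: c :: rest =>
    by_cases hY : a = 'Y' <;> by_cases hO : a = 'O' <;> by_cases hN : a = 'N' <;>
      by_cases hbY : b = 'Y' <;> by_cases hbO : b = 'O' <;> by_cases hbN : b = 'N' <;>
        simp_all [pvLoopA, pvTrans]

-- ===== VERDICT (by name: the statement is the Claim_ definition above) =====
theorem automata_logico_spec : Claim_equal_automata_logico := by
  intro s _
  unfold Spec_automata_logico automata_logico automata_logico_alt
  exact pvLoopA_eq_alt s.toList
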